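-- pv_equiv track=rewrite | github.com/ryrobes/cheshire | cheshire/main.py | group_by_color
-- ===== SOURCE A (Python) =====
-- from typing import Dict, List, Tuple, Optional, Any
--
-- def group_by_color(x_values: List, y_values: List, color_values: List) -> Dict[str, Tuple[List, List]]:
--     """Group x and y values by color."""
--     groups = {}
--     for x, y, color in zip(x_values, y_values, color_values):
--         if color not in groups:
--             groups[color] = ([], [])
--         groups[color][0].append(x)
--         groups[color][1].append(y)
--     return groups
-- ===== SOURCE B (Python) =====
-- def group_by_color(x_values, y_values, color_values):
--     """Group x and y values by color."""
--     items = list(zip(x_values, y_values, color_values))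
--     colors = dict.fromkeys(c for _, _, c in items)
--     return {c: ([x for x, _, col in items if col == c],
--                 [y for _, y, col in items if col == c])
--             for c in colors}
-- ===== Notes on version B (the rewrite author's own statement) =====
-- stated objective: alternative
-- what changed: Replaces A's single accumulating pass that mutates per-color list pairs in a dict with an index-first approach: zip the three inputs once, derive the first-occurrence color order via dict.fromkeys, then build each group by filtering the zipped items per color in a dict comprehension.
import Mathlib
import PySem

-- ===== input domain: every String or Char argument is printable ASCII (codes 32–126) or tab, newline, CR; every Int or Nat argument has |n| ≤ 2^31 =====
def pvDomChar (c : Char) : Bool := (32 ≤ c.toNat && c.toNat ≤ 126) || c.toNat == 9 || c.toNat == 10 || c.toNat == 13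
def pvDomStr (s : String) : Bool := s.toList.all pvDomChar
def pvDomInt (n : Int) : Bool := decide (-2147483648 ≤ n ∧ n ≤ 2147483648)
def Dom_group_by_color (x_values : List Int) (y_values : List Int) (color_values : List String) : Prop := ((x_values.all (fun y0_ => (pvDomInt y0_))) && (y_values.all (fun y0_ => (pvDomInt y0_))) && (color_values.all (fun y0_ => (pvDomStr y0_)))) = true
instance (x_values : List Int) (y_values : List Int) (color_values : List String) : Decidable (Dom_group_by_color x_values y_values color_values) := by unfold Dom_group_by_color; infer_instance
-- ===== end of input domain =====

-- B groups by an index-first strategy (dedup the colors, then filter per color) instead of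
-- A's single accumulating dict pass; alternative decomposition, same cost class.

-- ===== PORT A =====
-- one iteration of A's loop body on the dict (as an insertion-ordered assoc list):
-- 'if color not in groups: groups[color] = ([], [])' then append x and y to the entry in place
def gbcStep (g : List (String × List Int × List Int)) (t : Int × Int × String) :
    List (String × List Int × List Int) :=
  let g1 := if g.any (fun p => p.1 == t.2.2) then g else g ++ [(t.2.2, [], [])]
  g1.map (fun p => if p.1 == t.2.2 then (p.1, p.2.1 ++ [t.1], p.2.2 ++ [t.2.1]) else p)

def group_by_color (x_values : List Int) (y_values : List Int) (color_values : List String) : List (String × List Int × List Int) :=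
  (x_values.zip (y_values.zip color_values)).foldl gbcStep []

-- ===== PORT B =====
def group_by_color_alt (x_values : List Int) (y_values : List Int) (color_values : List String) : List (String × List Int × List Int) :=
  let items := x_values.zip (y_values.zip color_values)
  let colors := PySem.List.dedup (items.map (fun t => t.2.2))
  colors.map (fun col =>
    (col,
     (items.filter (fun t => t.2.2 == col)).map (fun t => t.1),
     (items.filter (fun t => t.2.2 == col)).map (fun t => t.2.1)))

-- ===== PRECONDITION & SPEC =====
def Spec_group_by_color (x_values : List Int) (y_values : List Int) (color_values : List String) (out : List (String × List Int × List Int)) : Prop := out = group_by_color_alt x_values y_values color_values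
instance (x_values : List Int) (y_values : List Int) (color_values : List String) (out : List (String × List Int × List Int)) : Decidable (Spec_group_by_color x_values y_values color_values out) := by unfold Spec_group_by_color; infer_instance

-- ===== CLAIM (what is proved, stated in full; the proofs are below) =====
def Claim_equal_group_by_color : Prop := ∀ (x_values : List Int) (y_values : List Int) (color_values : List String), Dom_group_by_color x_values y_values color_values → Spec_group_by_color x_values y_values color_values (group_by_color x_values y_values color_values)

-- ===== LEMMAS AND PROOFS =====

-- B's result as a function of the zipped item list
def gbcOf (items : List (Int × Int × String)) : List (String × List Int × List Int) :=
  (PySem.List.dedup (items.map (fun t => t.2.2))).map (fun col =>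
    (col,
     (items.filter (fun t => t.2.2 == col)).map (fun t => t.1),
     (items.filter (fun t => t.2.2 == col)).map (fun t => t.2.1)))

theorem alt_eq_gbcOf (x y : List Int) (c : List String) :
    group_by_color_alt x y c = gbcOf (x.zip (y.zip c)) := rfl

-- the per-entry update of A's loop body, applied to B's entry for col over p,
-- yields B's entry for col over p ++ [t]
theorem entry_step (p : List (Int × Int × String)) (t : Int × Int × String) (col : String) :
    (fun q : String × List Int × List Int =>
        if q.1 == t.2.2 then (q.1, q.2.1 ++ [t.1], q.2.2 ++ [t.2.1]) else q)
      (col,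
       (p.filter (fun u => u.2.2 == col)).map (fun u => u.1),
       (p.filter (fun u => u.2.2 == col)).map (fun u => u.2.1))
    = (col,
       ((p ++ [t]).filter (fun u => u.2.2 == col)).map (fun u => u.1),
       ((p ++ [t]).filter (fun u => u.2.2 == col)).map (fun u => u.2.1)) := by
  by_cases h : t.2.2 = col
  · subst h; simp [List.filter_append]
  · simp [List.filter_append, h, Ne.symm h]

theorem any_key_eq (p : List (Int × Int × String)) (c : String) :
    ((gbcOf p).any (fun q => q.1 == c)) = decide (c ∈ p.map (fun u => u.2.2)) := by
  unfold gbcOf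
  simp only [List.any_map, Function.comp_def]
  rw [Bool.eq_iff_iff]
  simp only [List.any_eq_true, PySem.List.mem_dedup, beq_iff_eq, decide_eq_true_eq]
  constructor
  · rintro ⟨x, hx, rfl⟩; exact hx
  · intro h; exact ⟨c, h, rfl⟩

theorem gbcStep_gbcOf (p : List (Int × Int × String)) (t : Int × Int × String) :
    gbcStep (gbcOf p) t = gbcOf (p ++ [t]) := by
  have hded : PySem.List.dedup ((p ++ [t]).map (fun u => u.2.2))
      = PySem.Set.add (PySem.List.dedup (p.map (fun u => u.2.2))) t.2.2 := by
    simp [PySem.Set.ofList_append_singleton]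
  by_cases hc : t.2.2 ∈ p.map (fun u => u.2.2)
  · -- existing color: key list unchanged, entries updated pointwise
    have hmem : t.2.2 ∈ PySem.List.dedup (p.map (fun u => u.2.2)) := by
      simpa [PySem.Set.mem_ofList] using hc
    rw [show gbcStep (gbcOf p) t
        = (gbcOf p).map (fun q : String × List Int × List Int =>
            if q.1 == t.2.2 then (q.1, q.2.1 ++ [t.1], q.2.2 ++ [t.2.1]) else q) from by
      unfold gbcStep; rw [any_key_eq]; simp [hc]]
    unfold gbcOf
    rw [hded, PySem.Set.add_of_mem hmem, List.map_map]
    exact List.map_congr_left (fun col _ => entry_step p t col)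
  · -- new color: a fresh entry is appended at the end
    have hmem : t.2.2 ∉ PySem.List.dedup (p.map (fun u => u.2.2)) := by
      simpa [PySem.Set.mem_ofList] using hc
    have hfilt : p.filter (fun u => u.2.2 == t.2.2) = [] := by
      rw [List.filter_eq_nil_iff]
      intro u hu hb
      exact hc (List.mem_map.mpr ⟨u, hu, (by simpa using hb)⟩)
    rw [show gbcStep (gbcOf p) t
        = (gbcOf p ++ [(t.2.2, [], [])]).map (fun q : String × List Int × List Int =>
            if q.1 == t.2.2 then (q.1, q.2.1 ++ [t.1], q.2.2 ++ [t.2.1]) else q) from by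
      unfold gbcStep; rw [any_key_eq]; simp [hc]]
    conv_rhs => unfold gbcOf
    rw [hded, PySem.Set.add_of_not_mem hmem]
    unfold gbcOf
    simp only [List.map_append, List.map_map, List.map_cons, List.map_nil]
    congr 1
    · exact List.map_congr_left (fun col _ => entry_step p t col)
    · simp [List.filter_append, hfilt]

theorem foldl_gbcStep (rest p : List (Int × Int × String)) :
    List.foldl gbcStep (gbcOf p) rest = gbcOf (p ++ rest) := by
  induction rest generalizing p with
  | nil => simp
  | cons t rest ih =>
      rw [List.foldl_cons, gbcStep_gbcOf, ih]
      simp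

-- ===== VERDICT (by name: the statement is the Claim_ definition above) =====
theorem group_by_color_spec : Claim_equal_group_by_color := by
  intro x y c _
  unfold Spec_group_by_color
  rw [alt_eq_gbcOf]
  have h0 : gbcOf [] = [] := rfl
  have := foldl_gbcStep (x.zip (y.zip c)) []
  rw [h0] at this
  simpa [group_by_color] using this
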